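-- pv_equiv track=rewrite | github.com/Naphat-Khoprasertthaworn/algo-python | a60_q1_matmod.py | matMod
-- ===== SOURCE A (Python) =====
-- def addMod( lhs,rhs,k ):
--     return ( lhs%k + rhs%k )%k
--
-- def mulMod( lhs,rhs,k ):
--     return ( lhs%k * rhs%k )%k
--
-- def matMul(lhs,rhs,k):
--     l = [0]*4
--     l[0] = addMod(mulMod( lhs[0],rhs[0],k ) , mulMod( lhs[1],rhs[2],k ) ,k)
--     l[1] = addMod(mulMod( lhs[0],rhs[1],k ) , mulMod( lhs[1],rhs[3],k ) ,k)
--     l[2] = addMod(mulMod( lhs[2],rhs[0],k ) , mulMod( lhs[3],rhs[2],k ) ,k)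
--     l[3] = addMod(mulMod( lhs[2],rhs[1],k ) , mulMod( lhs[3],rhs[3],k ) ,k)
--     return l
--
-- def matMod( matrix,n,k ):
--     if(n==1):
--         return matrix
--
--     mid = n//2
--     frac = n%2
--     halfMat = matMod(matrix,mid,k)
--
--     newMat = matMul( halfMat,list(halfMat),k );
--     if(frac==1):
--         newMat = matMul( newMat,matrix,k )
--     return newMat
-- ===== SOURCE B (Python) =====
-- def addMod(lhs, rhs, k):
--     return (lhs % k + rhs % k) % k
--
-- def mulMod(lhs, rhs, k):
--     return (lhs % k * rhs % k) % k
--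
-- def matMul(lhs, rhs, k):
--     l = [0]*4
--     l[0] = addMod(mulMod(lhs[0], rhs[0], k), mulMod(lhs[1], rhs[2], k), k)
--     l[1] = addMod(mulMod(lhs[0], rhs[1], k), mulMod(lhs[1], rhs[3], k), k)
--     l[2] = addMod(mulMod(lhs[2], rhs[0], k), mulMod(lhs[3], rhs[2], k), k)
--     l[3] = addMod(mulMod(lhs[2], rhs[1], k), mulMod(lhs[3], rhs[3], k), k)
--     return l
--
-- def matMod(matrix, n, k):
--     # two staged passes instead of recursion: extract the binary digits of n,
--     # then fold over them left-to-right (square, multiply in the matrix on a 1 bit)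
--     if n == 1:
--         return matrix
--     bits = []
--     while n > 0:
--         bits.append(n % 2)
--         n //= 2
--     bits.pop()          # drop the leading 1 bit: the fold starts from the matrix itself
--     result = matrix
--     for bit in reversed(bits):
--         result = matMul(result, result, k)
--         if bit == 1:
--             result = matMul(result, matrix, k)
--     return result
-- ===== Notes on version B (the rewrite author's own statement) =====
-- stated objective: alternative
-- what changed: A's divide-and-conquer recursion (recurse on n//2, square the result, fix up the odd bit) is replaced by two non-recursive staged passes: a loop extracting the binary digits of n, then a left-to-right fold over those bits that squares the accumulator and multiplies in the matrix on each 1 bit.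
import Mathlib
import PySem

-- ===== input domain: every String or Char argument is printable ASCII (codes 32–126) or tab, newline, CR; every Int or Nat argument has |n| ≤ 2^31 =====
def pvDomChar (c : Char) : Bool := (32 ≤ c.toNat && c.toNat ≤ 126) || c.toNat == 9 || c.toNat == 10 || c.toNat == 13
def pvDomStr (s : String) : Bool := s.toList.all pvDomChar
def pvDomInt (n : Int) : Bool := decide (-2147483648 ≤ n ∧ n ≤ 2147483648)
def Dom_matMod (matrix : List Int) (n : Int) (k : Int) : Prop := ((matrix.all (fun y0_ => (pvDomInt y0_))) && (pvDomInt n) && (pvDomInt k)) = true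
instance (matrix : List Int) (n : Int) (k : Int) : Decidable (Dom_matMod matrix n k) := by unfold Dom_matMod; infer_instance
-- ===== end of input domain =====

-- B replaces A's divide-and-conquer recursion by two staged passes: extract the binary
-- digits of n, then fold over them left-to-right, squaring and multiplying (objective: alternative).


-- ===== PORT A =====
-- xs[i]: total wrapper over PySem.List.pyGet?; Python raises IndexError where it is none,
-- which Pre_matMod excludes (matrix length ≥ 4 whenever n ≠ 1; matMul results have length 4).
def pvGet (xs : List Int) (i : Int) : Int := PySem.List.pyGetD xs i 0

def addMod (lhs rhs k : Int) : Int :=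
  PySem.Int.mod (PySem.Int.mod lhs k + PySem.Int.mod rhs k) k

def mulMod (lhs rhs k : Int) : Int :=
  PySem.Int.mod (PySem.Int.mod lhs k * PySem.Int.mod rhs k) k

def matMul (lhs rhs : List Int) (k : Int) : List Int :=
  [ addMod (mulMod (pvGet lhs 0) (pvGet rhs 0) k) (mulMod (pvGet lhs 1) (pvGet rhs 2) k) k,
    addMod (mulMod (pvGet lhs 0) (pvGet rhs 1) k) (mulMod (pvGet lhs 1) (pvGet rhs 3) k) k,
    addMod (mulMod (pvGet lhs 2) (pvGet rhs 0) k) (mulMod (pvGet lhs 3) (pvGet rhs 2) k) k,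
    addMod (mulMod (pvGet lhs 2) (pvGet rhs 1) k) (mulMod (pvGet lhs 3) (pvGet rhs 3) k) k ]

-- Python recurses forever (RecursionError) for n ≤ 0; that guard only makes the port total
-- and is excluded by Pre_matMod.
def matMod (matrix : List Int) (n : Int) (k : Int) : List Int :=
  if n = 1 then matrix
  else if n ≤ 0 then []
  else
    let mid := PySem.Int.floordiv n 2
    let frac := PySem.Int.mod n 2
    let halfMat := matMod matrix mid k
    let newMat := matMul halfMat halfMat k
    if frac = 1 then matMul newMat matrix k else newMat
termination_by n.toNat
decreasing_by
  have h2 : PySem.Int.floordiv n 2 = n / 2 := PySem.Int.floordiv_eq_ediv_of_pos (by omega)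
  rw [h2]; omega

-- ===== PORT B =====
-- the while loop of Source B collecting the binary digits of n (little-endian)
def pvBits (n : Int) : List Int :=
  if n ≤ 0 then []
  else PySem.Int.mod n 2 :: pvBits (PySem.Int.floordiv n 2)
termination_by n.toNat
decreasing_by
  have h2 : PySem.Int.floordiv n 2 = n / 2 := PySem.Int.floordiv_eq_ediv_of_pos (by omega)
  rw [h2]; omega

-- bits.pop() raises IndexError on the empty list (n ≤ 0, excluded by Pre_matMod);
-- here only the remaining list matters, dropLast
def matMod_alt (matrix : List Int) (n : Int) (k : Int) : List Int :=
  if n = 1 then matrix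
  else
    let bits := (pvBits n).dropLast
    bits.reverse.foldl
      (fun result bit =>
        let sq := matMul result result k
        if bit = 1 then matMul sq matrix k else sq)
      matrix

-- ===== PRECONDITION & SPEC =====
-- Pre_matMod is exactly where Python A returns: n = 1 returns matrix unchanged; for n ≥ 2
-- it needs k ≠ 0 (ZeroDivisionError) and at least 4 entries (IndexError); n ≤ 0 never terminates.
def Pre_matMod (matrix : List Int) (n : Int) (k : Int) : Prop :=
  n = 1 ∨ (2 ≤ n ∧ k ≠ 0 ∧ 4 ≤ matrix.length)
instance (matrix : List Int) (n : Int) (k : Int) : Decidable (Pre_matMod matrix n k) := by unfold Pre_matMod; infer_instance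
def pvWitness_matMod : List Int × Int × Int := ([1, 2, 3, 4], 5, 7)

def Spec_matMod (matrix : List Int) (n : Int) (k : Int) (out : List Int) : Prop := out = matMod_alt matrix n k
instance (matrix : List Int) (n : Int) (k : Int) (out : List Int) : Decidable (Spec_matMod matrix n k out) := by unfold Spec_matMod; infer_instance

-- ===== CLAIM (what is proved, stated in full; the proofs are below) =====
def Claim_equal_matMod : Prop := ∀ (matrix : List Int) (n : Int) (k : Int), Dom_matMod matrix n k → Pre_matMod matrix n k → Spec_matMod matrix n k (matMod matrix n k)
-- ===== LEMMAS AND PROOFS =====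
-- proof view of a 4-entry list as a 2x2 integer matrix, and the entrywise Python-mod image
def toM (xs : List Int) : Matrix (Fin 2) (Fin 2) Int :=
  !![pvGet xs 0, pvGet xs 1; pvGet xs 2, pvGet xs 3]
def ofM (k : Int) (A : Matrix (Fin 2) (Fin 2) Int) : List Int :=
  [PySem.Int.mod (A 0 0) k, PySem.Int.mod (A 0 1) k, PySem.Int.mod (A 1 0) k, PySem.Int.mod (A 1 1) k]
def Mcong (k : Int) (A B : Matrix (Fin 2) (Fin 2) Int) : Prop := ∀ i j, k ∣ (A i j - B i j)

theorem pymod_congr {k a b : Int} (hk : k ≠ 0) (h : k ∣ (a - b)) :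
    PySem.Int.mod a k = PySem.Int.mod b k := by
  have ha := PySem.Int.floordiv_mul_add_mod a k
  have hb := PySem.Int.floordiv_mul_add_mod b k
  have hd : k ∣ (PySem.Int.mod a k - PySem.Int.mod b k) := by
    obtain ⟨c, hc⟩ := h
    exact ⟨c - PySem.Int.floordiv a k + PySem.Int.floordiv b k, by linarith⟩
  rcases lt_or_gt_of_ne hk with hneg | hpos
  · have b1 := PySem.Int.mod_neg_bounds a hneg
    have b2 := PySem.Int.mod_neg_bounds b hneg
    have : |PySem.Int.mod a k - PySem.Int.mod b k| < -k := by
      rw [abs_lt]; omega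
    have := Int.eq_zero_of_abs_lt_dvd (neg_dvd.mpr hd) this
    omega
  · have b1 := PySem.Int.mod_nonneg a hpos
    have b2 := PySem.Int.mod_lt a hpos
    have b3 := PySem.Int.mod_nonneg b hpos
    have b4 := PySem.Int.mod_lt b hpos
    have : |PySem.Int.mod a k - PySem.Int.mod b k| < k := by rw [abs_lt]; omega
    have := Int.eq_zero_of_abs_lt_dvd hd this
    omega

theorem pymod_sub_dvd (k a : Int) : k ∣ (PySem.Int.mod a k - a) :=
  ⟨-PySem.Int.floordiv a k, by have := PySem.Int.floordiv_mul_add_mod a k; linarith⟩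

theorem mulMod_eq {k : Int} (hk : k ≠ 0) (a b : Int) :
    mulMod a b k = PySem.Int.mod (a * b) k := by
  unfold mulMod
  refine pymod_congr hk ?_
  have h1 := pymod_sub_dvd k a
  have h2 := pymod_sub_dvd k b
  have : PySem.Int.mod a k * PySem.Int.mod b k - a * b
      = (PySem.Int.mod a k - a) * PySem.Int.mod b k + a * (PySem.Int.mod b k - b) := by ring
  rw [this]
  exact dvd_add (Dvd.dvd.mul_right h1 _) (Dvd.dvd.mul_left h2 _)

theorem addMod_eq {k : Int} (hk : k ≠ 0) (a b : Int) :
    addMod a b k = PySem.Int.mod (a + b) k := by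
  unfold addMod
  refine pymod_congr hk ?_
  have : PySem.Int.mod a k + PySem.Int.mod b k - (a + b)
      = (PySem.Int.mod a k - a) + (PySem.Int.mod b k - b) := by ring
  rw [this]
  exact dvd_add (pymod_sub_dvd k a) (pymod_sub_dvd k b)

theorem amm {k : Int} (hk : k ≠ 0) (a b c d : Int) :
    addMod (mulMod a b k) (mulMod c d k) k = PySem.Int.mod (a * b + c * d) k := by
  rw [mulMod_eq hk, mulMod_eq hk, addMod_eq hk]
  refine pymod_congr hk ?_
  have : PySem.Int.mod (a*b) k + PySem.Int.mod (c*d) k - (a*b + c*d)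
      = (PySem.Int.mod (a*b) k - a*b) + (PySem.Int.mod (c*d) k - c*d) := by ring
  rw [this]
  exact dvd_add (pymod_sub_dvd k _) (pymod_sub_dvd k _)

theorem matMul_eq {k : Int} (hk : k ≠ 0) (x y : List Int) :
    matMul x y k = ofM k (toM x * toM y) := by
  simp [matMul, ofM, toM, amm hk, Matrix.mul_apply, Fin.sum_univ_two]

theorem Mcong_refl (k : Int) (A : Matrix (Fin 2) (Fin 2) Int) : Mcong k A A := by
  intro i j; simp

theorem Mcong_mul {k : Int} {A A' B B' : Matrix (Fin 2) (Fin 2) Int}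
    (hA : Mcong k A A') (hB : Mcong k B B') : Mcong k (A * B) (A' * B') := by
  intro i j
  have h : (A * B) i j - (A' * B') i j
      = ((A i 0 - A' i 0) * B 0 j + A' i 0 * (B 0 j - B' 0 j))
      + ((A i 1 - A' i 1) * B 1 j + A' i 1 * (B 1 j - B' 1 j)) := by
    simp [Matrix.mul_apply, Fin.sum_univ_two]; ring
  rw [h]
  exact dvd_add (dvd_add ((hA i 0).mul_right _) ((hB 0 j).mul_left _))
                (dvd_add ((hA i 1).mul_right _) ((hB 1 j).mul_left _))

theorem toM_ofM {k : Int} (A : Matrix (Fin 2) (Fin 2) Int) :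
    Mcong k (toM (ofM k A)) A := by
  intro i j
  fin_cases i <;> fin_cases j <;>
    · show k ∣ (PySem.Int.mod _ k - _)
      exact pymod_sub_dvd k _

theorem ofM_congr {k : Int} (hk : k ≠ 0) {A B : Matrix (Fin 2) (Fin 2) Int}
    (h : Mcong k A B) : ofM k A = ofM k B := by
  simp only [ofM, List.cons.injEq, and_true]
  exact ⟨pymod_congr hk (h 0 0), pymod_congr hk (h 0 1),
         pymod_congr hk (h 1 0), pymod_congr hk (h 1 1)⟩

theorem matMul_ofM_left {k : Int} (hk : k ≠ 0) (A : Matrix (Fin 2) (Fin 2) Int) (y : List Int) :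
    matMul (ofM k A) y k = ofM k (A * toM y) := by
  rw [matMul_eq hk]
  exact ofM_congr hk (Mcong_mul (toM_ofM A) (Mcong_refl k _))

theorem matMul_ofM_both {k : Int} (hk : k ≠ 0) (A B : Matrix (Fin 2) (Fin 2) Int) :
    matMul (ofM k A) (ofM k B) k = ofM k (A * B) := by
  rw [matMul_eq hk]
  exact ofM_congr hk (Mcong_mul (toM_ofM A) (toM_ofM B))

-- A's characterisation: for n ≥ 2 it computes the entrywise-reduced n-th power.
theorem matMod_pow (k : Int) (hk : k ≠ 0) (matrix : List Int) :
    ∀ (m : Nat) (n : Int), n.toNat = m → 2 ≤ n →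
      matMod matrix n k = ofM k (toM matrix ^ n.toNat) := by
  intro m
  induction m using Nat.strong_induction_on with
  | _ m ih =>
    intro n hm hn
    have hmid : PySem.Int.floordiv n 2 = n / 2 := PySem.Int.floordiv_eq_ediv_of_pos (by omega)
    have hfrac : PySem.Int.mod n 2 = n % 2 := PySem.Int.mod_eq_emod_of_pos (by omega)
    rw [matMod, if_neg (by omega : ¬ n = 1), if_neg (by omega : ¬ n ≤ 0)]
    simp only [hmid, hfrac]
    by_cases h1 : n / 2 = 1
    · have h23 : n = 2 ∨ n = 3 := by omega
      have hbase : matMod matrix (n / 2) k = matrix := by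
        rw [h1, matMod, if_pos rfl]
      rw [hbase]
      rcases h23 with h2 | h3
      · subst h2
        rw [if_neg (by decide), matMul_eq hk,
          show ((2:Int).toNat) = 2 from rfl, pow_two]
      · subst h3
        rw [if_pos (by decide), matMul_eq hk matrix matrix, matMul_ofM_left hk,
          show ((3:Int).toNat) = 3 from rfl, pow_succ, pow_two]
    · have hge : 2 ≤ n / 2 := by omega
      have hlt : (n / 2).toNat < m := by omega
      have hrec := ih (n / 2).toNat hlt (n / 2) rfl hge
      rw [hrec, matMul_ofM_both hk, ← pow_add]
      by_cases hodd : n % 2 = 1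
      · rw [if_pos hodd, matMul_ofM_left hk, ← pow_succ]
        have : (n / 2).toNat + (n / 2).toNat + 1 = n.toNat := by omega
        rw [this]
      · rw [if_neg hodd]
        have : (n / 2).toNat + (n / 2).toNat = n.toNat := by omega
        rw [this]

-- B's fold invariant: folding big-endian bits over an accumulator congruent to M^e yields
-- the entrywise-reduced power M^(foldl-value of the bits starting from e).
theorem foldBits_pow (k : Int) (hk : k ≠ 0) (matrix : List Int) :
    ∀ (bs : List Int) (e : Nat) (acc : List Int), bs ≠ [] →
      (∀ b ∈ bs, b = 0 ∨ b = 1) →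
      Mcong k (toM acc) (toM matrix ^ e) →
      bs.foldl
        (fun result bit =>
          let sq := matMul result result k
          if bit = 1 then matMul sq matrix k else sq)
        acc
      = ofM k (toM matrix ^ bs.foldl (fun a b => 2 * a + b.toNat) e) := by
  intro bs
  induction bs with
  | nil => intro e acc h; exact absurd rfl h
  | cons b bs ih =>
    intro e acc _ hb hacc
    have hb0 : b = 0 ∨ b = 1 := hb b (List.mem_cons_self ..)
    have hsq : Mcong k (toM (matMul acc acc k)) (toM matrix ^ (2 * e)) := by
      rw [matMul_eq hk]
      intro i j
      have h1 := toM_ofM (k := k) (toM acc * toM acc) i j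
      have h2 := Mcong_mul hacc hacc i j
      have h3 : toM matrix ^ e * toM matrix ^ e = toM matrix ^ (2 * e) := by
        rw [← pow_add]; ring_nf
      rw [← h3]
      simpa using dvd_add h1 h2
    have hstep : ∀ (r : List Int) (e' : Nat), Mcong k (toM r) (toM matrix ^ e') →
        Mcong k (toM (matMul r matrix k)) (toM matrix ^ (e' + 1)) := by
      intro r e' hr
      rw [matMul_eq hk]
      intro i j
      have h1 := toM_ofM (k := k) (toM r * toM matrix) i j
      have h2 := Mcong_mul hr (Mcong_refl k (toM matrix)) i j
      rw [pow_succ]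
      simpa using dvd_add h1 h2
    rcases List.eq_nil_or_concat bs with hnil | _
    · subst hnil
      simp only [List.foldl]
      rcases hb0 with h0 | h1
      · subst h0
        rw [if_neg (by decide)]
        rw [matMul_eq hk]
        refine ofM_congr hk ?_
        intro i j
        have h1 := Mcong_mul hacc hacc i j
        have h3 : toM matrix ^ e * toM matrix ^ e = toM matrix ^ (2 * e + (0:Int).toNat) := by
          rw [← pow_add]; norm_num; ring_nf
        rw [← h3]; exact h1
      · subst h1
        rw [if_pos rfl]
        rw [matMul_eq hk]
        refine ofM_congr hk ?_
        have harith : 2 * e + (1:Int).toNat = 2 * e + 1 := rfl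
        rw [harith, pow_succ]
        exact Mcong_mul hsq (Mcong_refl k (toM matrix))
    · have hbs : bs ≠ [] := by rintro rfl; simp at *
      simp only [List.foldl]
      rcases hb0 with h0 | h1
      · subst h0
        rw [if_neg (by decide)]
        exact ih (2 * e) _ hbs (fun x hx => hb x (List.mem_cons_of_mem _ hx)) (by simpa using hsq)
      · subst h1
        rw [if_pos rfl]
        exact ih (2 * e + 1) _ hbs (fun x hx => hb x (List.mem_cons_of_mem _ hx))
          (by simpa using hstep (matMul acc acc k) (2 * e) hsq)

-- the digit loop: for n ≥ 1 the bits are 0/1, end in a 1, and evaluate back to n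
theorem pvBits_spec :
    ∀ (m : Nat) (n : Int), n.toNat = m → 1 ≤ n →
      (∀ b ∈ pvBits n, b = 0 ∨ b = 1) ∧
      (∃ ys, pvBits n = ys ++ [1]) ∧
      (pvBits n).foldr (fun b a => 2 * a + b.toNat) 0 = n.toNat := by
  intro m
  induction m using Nat.strong_induction_on with
  | _ m ih =>
    intro n hm hn
    have hmid : PySem.Int.floordiv n 2 = n / 2 := PySem.Int.floordiv_eq_ediv_of_pos (by omega)
    have hfrac : PySem.Int.mod n 2 = n % 2 := PySem.Int.mod_eq_emod_of_pos (by omega)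
    rw [pvBits, if_neg (by omega : ¬ n ≤ 0)]
    simp only [hmid, hfrac]
    by_cases h1 : n = 1
    · subst h1
      have h0 : pvBits (0:Int) = [] := by rw [pvBits]; norm_num
      refine ⟨by norm_num [h0], ⟨[], by norm_num [h0]⟩, by norm_num [h0]⟩
    · have hge : 1 ≤ n / 2 := by omega
      have hlt : (n / 2).toNat < m := by omega
      obtain ⟨hb, ⟨ys, hys⟩, hval⟩ := ih (n / 2).toNat hlt (n / 2) rfl hge
      refine ⟨?_, ⟨n % 2 :: ys, by rw [hys]; rfl⟩, ?_⟩
      · intro b hbmem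
        rcases List.mem_cons.mp hbmem with h | h
        · omega
        · exact hb b h
      · simp only [List.foldr_cons, hval]
        omega

-- ===== VERDICT (by name: the statement is the Claim_ definition above) =====
theorem matMod_spec : Claim_equal_matMod := by
  intro matrix n k _ hpre
  show matMod matrix n k = matMod_alt matrix n k
  rcases hpre with h1 | ⟨hn, hk, _⟩
  · subst h1
    rw [matMod, if_pos rfl, matMod_alt, if_pos rfl]
  · rw [matMod_pow k hk matrix n.toNat n rfl hn]
    rw [matMod_alt, if_neg (by omega : ¬ n = 1)]
    obtain ⟨hb, ⟨ys, hys⟩, hval⟩ := pvBits_spec n.toNat n rfl (by omega)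
    have hys' : ys ≠ [] := by
      rintro rfl
      rw [hys] at hval
      simp at hval
      omega
    have hdrop : (pvBits n).dropLast = ys := by rw [hys]; simp
    rw [hdrop]
    have hbys : ∀ b ∈ ys.reverse, b = 0 ∨ b = 1 := by
      intro b hbm
      exact hb b (by rw [hys]; exact List.mem_append_left _ (List.mem_reverse.mp hbm))
    rw [foldBits_pow k hk matrix ys.reverse 1 matrix (by simpa using hys') hbys
      (by rw [pow_one]; exact Mcong_refl k _)]
    congr 2
    rw [List.foldl_reverse]
    have hfr : (pvBits n).foldr (fun b a => 2 * a + b.toNat) 0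
        = ys.foldr (fun b a => 2 * a + b.toNat) 1 := by
      rw [hys, List.foldr_append]
      norm_num
    rw [hfr] at hval
    rw [← hval]
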